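-- pv_equiv track=rewrite | github.com/matteici/Software-Engineering-First-Project | temp_place.py | _find_clear_lane_x
-- ===== SOURCE A (Python) =====
-- from typing import Any, DefaultDict, Dict, Hashable, Iterable, List, Optional, Set, Tuple
--
-- def _clamp(val: int, lo: int, hi: int) -> int:
--     return max(lo, min(hi, val))
--
-- def _find_clear_lane_x(
--     ux: int,
--     uy: int,
--     offsets: List[int],
--     occupied_centers: Set[Tuple[int, int]],
--     width: int,
--     height: int,
--     start_dx: int = 2,
-- ) -> int:
--     """
--     Find a split column > ux where:
--       - (lane_x, uy) is not a gate center
--       - (lane_x, uy+off) are not gate centers for all lane offsets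
--     Fallback: first trunk-clear column.
--     """
--     fallback = None
--     for dx in range(start_dx, max(start_dx, width - ux)):
--         lx = ux + dx
--         mid = (lx, uy)
--         if mid in occupied_centers:
--             continue
--         lanes_ok = True
--         for off in offsets:
--             yy = _clamp(uy + off, 0, height - 1)
--             if (lx, yy) in occupied_centers:
--                 lanes_ok = False
--                 break
--         if lanes_ok:
--             return lx
--         if fallback is None:
--             fallback = lx
--     return fallback if fallback is not None else min(width - 1, ux + start_dx)
-- ===== SOURCE B (Python) =====
-- def _find_clear_lane_x(ux, uy, offsets, occupied_centers, width, height, start_dx=2):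
--     columns = range(start_dx, max(start_dx, width - ux))
--
--     def mid_clear(dx):
--         return (ux + dx, uy) not in occupied_centers
--
--     def lanes_clear(dx):
--         return all((ux + dx, max(0, min(height - 1, uy + off))) not in occupied_centers
--                    for off in offsets)
--
--     full = next((ux + dx for dx in columns if mid_clear(dx) and lanes_clear(dx)), None)
--     if full is not None:
--         return full
--     fallback = next((ux + dx for dx in columns if mid_clear(dx)), None)
--     return fallback if fallback is not None else min(width - 1, ux + start_dx)
-- ===== Notes on version B (the rewrite author's own statement) =====
-- stated objective: simpler
-- what changed: Replaces the fused early-exit loop with fallback accumulator by two independent declarative scans over the precomputed column list: first column that is mid-clear and lane-clear, else first mid-clear column, else the default.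
import Mathlib
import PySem

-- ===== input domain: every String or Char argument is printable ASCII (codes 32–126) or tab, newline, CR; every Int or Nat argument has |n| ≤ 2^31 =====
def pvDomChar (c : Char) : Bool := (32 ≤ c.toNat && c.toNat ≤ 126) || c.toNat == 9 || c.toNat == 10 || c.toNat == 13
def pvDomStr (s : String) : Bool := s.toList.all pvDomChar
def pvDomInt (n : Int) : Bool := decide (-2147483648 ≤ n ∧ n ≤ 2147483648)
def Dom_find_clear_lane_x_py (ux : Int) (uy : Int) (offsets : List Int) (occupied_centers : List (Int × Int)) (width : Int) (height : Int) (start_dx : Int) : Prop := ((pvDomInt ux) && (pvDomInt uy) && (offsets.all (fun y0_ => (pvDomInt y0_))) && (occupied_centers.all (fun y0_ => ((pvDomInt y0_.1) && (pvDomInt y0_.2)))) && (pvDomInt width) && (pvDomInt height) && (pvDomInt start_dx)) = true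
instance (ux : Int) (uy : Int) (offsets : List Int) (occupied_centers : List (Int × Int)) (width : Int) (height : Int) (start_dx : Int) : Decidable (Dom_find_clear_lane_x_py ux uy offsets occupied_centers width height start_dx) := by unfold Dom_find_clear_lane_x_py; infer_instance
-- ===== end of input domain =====

-- ===== PORT A =====
-- B replaces A's fused early-exit loop (fallback accumulator) by two declarative scans; objective: simpler.
-- _clamp(val, lo, hi)
def pvClamp (val lo hi : Int) : Int := max lo (min hi val)

-- inner 'for off in offsets' loop with break
def pvLanesOkA (uy : Int) (occ : List (Int × Int)) (height lx : Int) : List Int → Bool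
  | [] => true
  | off :: rest =>
      if occ.contains (lx, pvClamp (uy + off) 0 (height - 1)) then false
      else pvLanesOkA uy occ height lx rest

-- 'for dx in range(start_dx, stop)' with early return and fallback accumulator
-- (Python's range is lazy, so the loop is ported as recursion on the counter dx)
def pvLoopA (ux uy : Int) (offsets : List Int) (occ : List (Int × Int)) (width height start_dx stop : Int) (dx : Int) (fb : Option Int) : Int :=
  if _h : dx < stop then
    let lx := ux + dx
    if occ.contains (lx, uy) then
      pvLoopA ux uy offsets occ width height start_dx stop (dx + 1) fb
    else if pvLanesOkA uy occ height lx offsets then lx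
    else
      pvLoopA ux uy offsets occ width height start_dx stop (dx + 1)
        (match fb with | none => some lx | some f => some f)
  else
    match fb with | some f => f | none => min (width - 1) (ux + start_dx)
termination_by (stop - dx).toNat
decreasing_by all_goals omega

def find_clear_lane_x_py (ux : Int) (uy : Int) (offsets : List Int) (occupied_centers : List (Int × Int)) (width : Int) (height : Int) (start_dx : Int) : Int :=
  pvLoopA ux uy offsets occupied_centers width height start_dx
    (max start_dx (width - ux)) start_dx none

-- ===== PORT B =====
-- next((ux+dx for dx in range(dx0, stop) if p(dx)), None), i.e. a lazy scan of the range
def pvScan (p : Int → Bool) (stop dx : Int) : Option Int :=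
  if _h : dx < stop then
    if p dx then some dx else pvScan p stop (dx + 1)
  else none
termination_by (stop - dx).toNat
decreasing_by all_goals omega

def find_clear_lane_x_py_alt (ux : Int) (uy : Int) (offsets : List Int) (occupied_centers : List (Int × Int)) (width : Int) (height : Int) (start_dx : Int) : Int :=
  let stop := max start_dx (width - ux)
  let midClear := fun (dx : Int) => !occupied_centers.contains (ux + dx, uy)
  let lanesClear := fun (dx : Int) =>
    offsets.all (fun off => !occupied_centers.contains (ux + dx, max 0 (min (height - 1) (uy + off))))
  match pvScan (fun dx => midClear dx && lanesClear dx) stop start_dx with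
  | some dx => ux + dx
  | none =>
    match pvScan midClear stop start_dx with
    | some dx => ux + dx
    | none => min (width - 1) (ux + start_dx)

-- ===== PRECONDITION & SPEC =====
def Spec_find_clear_lane_x_py (ux : Int) (uy : Int) (offsets : List Int) (occupied_centers : List (Int × Int)) (width : Int) (height : Int) (start_dx : Int) (out : Int) : Prop := out = find_clear_lane_x_py_alt ux uy offsets occupied_centers width height start_dx
instance (ux : Int) (uy : Int) (offsets : List Int) (occupied_centers : List (Int × Int)) (width : Int) (height : Int) (start_dx : Int) (out : Int) : Decidable (Spec_find_clear_lane_x_py ux uy offsets occupied_centers width height start_dx out) := by unfold Spec_find_clear_lane_x_py; infer_instance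

-- ===== CLAIM (what is proved, stated in full; the proofs are below) =====
def Claim_equal_find_clear_lane_x_py : Prop := ∀ (ux : Int) (uy : Int) (offsets : List Int) (occupied_centers : List (Int × Int)) (width : Int) (height : Int) (start_dx : Int), Dom_find_clear_lane_x_py ux uy offsets occupied_centers width height start_dx → Spec_find_clear_lane_x_py ux uy offsets occupied_centers width height start_dx (find_clear_lane_x_py ux uy offsets occupied_centers width height start_dx)


-- ===== LEMMAS AND PROOFS =====
theorem pvScan_step (p : Int → Bool) (stop dx : Int) (h : dx < stop) :
    pvScan p stop dx = if p dx then some dx else pvScan p stop (dx + 1) := by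
  rw [pvScan]; simp [h]

theorem pvScan_stop (p : Int → Bool) (stop dx : Int) (h : ¬ dx < stop) :
    pvScan p stop dx = none := by
  rw [pvScan]; simp [h]

theorem pvLanesOkA_eq_all (uy : Int) (occ : List (Int × Int)) (height lx : Int) (offs : List Int) :
    pvLanesOkA uy occ height lx offs
      = offs.all (fun off => !occ.contains (lx, max 0 (min (height - 1) (uy + off)))) := by
  induction offs with
  | nil => rfl
  | cons off rest ih =>
      simp only [pvLanesOkA, pvClamp, List.all_cons, ih]
      by_cases h : occ.contains (lx, max 0 (min (height - 1) (uy + off))) <;> simp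

theorem pvLoopA_eq (ux uy : Int) (offsets : List Int) (occ : List (Int × Int)) (width height start_dx stop : Int) :
    ∀ (n : Nat) (dx : Int) (fb : Option Int), (stop - dx).toNat ≤ n →
    pvLoopA ux uy offsets occ width height start_dx stop dx fb =
      match pvScan (fun d => !occ.contains (ux + d, uy) &&
          offsets.all (fun off => !occ.contains (ux + d, max 0 (min (height - 1) (uy + off))))) stop dx with
      | some d => ux + d
      | none =>
        match fb with
        | some f => f
        | none =>
          match pvScan (fun d => !occ.contains (ux + d, uy)) stop dx with
          | some d => ux + d
          | none => min (width - 1) (ux + start_dx) := by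
  intro n
  induction n with
  | zero =>
      intro dx fb hn
      have h : ¬ dx < stop := by omega
      rw [pvLoopA.eq_def, pvScan_stop _ _ _ h, pvScan_stop _ _ _ h]
      simp [h]
  | succ n ih =>
      intro dx fb hn
      by_cases h : dx < stop
      · rw [pvLoopA.eq_def, pvScan_step _ _ _ h, pvScan_step _ _ _ h]
        simp only [h, reduceDIte, pvLanesOkA_eq_all]
        have hrec : (stop - (dx + 1)).toNat ≤ n := by omega
        cases hmid : occ.contains (ux + dx, uy) with
        | true =>
            simp only [Bool.not_true, Bool.false_and, reduceIte, ih _ _ hrec]; simp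
        | false =>
            simp only [Bool.not_false, Bool.true_and]
            cases hl : offsets.all (fun off => !occ.contains (ux + dx, max 0 (min (height - 1) (uy + off)))) with
            | true => simp only [reduceIte]; simp
            | false =>
                simp only [ih _ _ hrec]
                cases fb with
                | none => cases hfull : pvScan (fun d => !occ.contains (ux + d, uy) &&
                    offsets.all (fun off => !occ.contains (ux + d, max 0 (min (height - 1) (uy + off))))) stop (dx + 1) <;>
                    simp
                | some f => rfl
      · have h0 : (stop - dx).toNat ≤ 0 := by omega
        rw [pvLoopA.eq_def, pvScan_stop _ _ _ h, pvScan_stop _ _ _ h]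
        simp [h]

-- ===== VERDICT (by name: the statement is the Claim_ definition above) =====
theorem find_clear_lane_x_py_spec : Claim_equal_find_clear_lane_x_py := by
  intro ux uy offsets occ width height start_dx _
  unfold Spec_find_clear_lane_x_py find_clear_lane_x_py find_clear_lane_x_py_alt
  rw [pvLoopA_eq ux uy offsets occ width height start_dx _ ((max start_dx (width - ux)) - start_dx).toNat start_dx none le_rfl]
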